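-- pv_equiv track=rewrite | github.com/HaruyoshiOno/Stock-inventry-in-Amazon | Pythonfiles/MailGet_thunderbird.py | contains_digits_and_commas
-- ===== SOURCE A (Python) =====
-- def contains_digits_and_commas(s):
--     contains_digit = False
--     contains_comma = False
--     for char in s:
--         if char.isdigit():
--             contains_digit = True
--         elif char == ',' or char == '+' or char == '-':
--             contains_comma = True
--         if contains_digit and contains_comma:
--             return True
--     return False
-- ===== SOURCE B (Python) =====
-- def contains_digits_and_commas(s):
--     return any(c.isdigit() for c in s) and any(c in ',+-' for c in s)
-- ===== Notes on version B (the rewrite author's own statement) =====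
-- stated objective: simpler
-- what changed: Replaced A's single early-exiting loop tracking two boolean flags with two independent any() membership scans whose results are conjoined.
import Mathlib
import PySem

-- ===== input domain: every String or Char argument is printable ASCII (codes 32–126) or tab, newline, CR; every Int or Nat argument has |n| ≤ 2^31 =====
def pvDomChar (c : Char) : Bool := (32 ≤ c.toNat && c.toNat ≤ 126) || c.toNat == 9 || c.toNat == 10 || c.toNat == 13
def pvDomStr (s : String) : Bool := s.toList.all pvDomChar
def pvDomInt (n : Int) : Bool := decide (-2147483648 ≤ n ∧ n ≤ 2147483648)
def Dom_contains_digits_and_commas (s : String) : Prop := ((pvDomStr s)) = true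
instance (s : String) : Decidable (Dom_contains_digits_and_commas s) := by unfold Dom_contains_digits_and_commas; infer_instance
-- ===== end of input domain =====

-- B replaces A's single flag-tracking early-exit loop by two independent any-scans combined with &&; objective: simpler.

-- ===== PORT A =====
-- the for-loop with its two mutable flags, branch order and early return kept
def cdcLoopA : List Char → Bool → Bool → Bool
  | [], _, _ => false
  | c :: rest, contains_digit, contains_comma =>
    let contains_digit' := if PySem.Chars.isdigit c then true else contains_digit
    let contains_comma' :=
      if PySem.Chars.isdigit c then contains_comma
      else if c == ',' || c == '+' || c == '-' then true else contains_comma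
    if contains_digit' && contains_comma' then true
    else cdcLoopA rest contains_digit' contains_comma'

def contains_digits_and_commas (s : String) : Bool :=
  cdcLoopA s.toList false false

-- ===== PORT B =====
def contains_digits_and_commas_alt (s : String) : Bool :=
  (s.toList.any fun c => PySem.Chars.isdigit c) &&
  (s.toList.any fun c => [',', '+', '-'].contains c)

-- ===== PRECONDITION & SPEC =====
def Spec_contains_digits_and_commas (s : String) (out : Bool) : Prop := out = contains_digits_and_commas_alt s
instance (s : String) (out : Bool) : Decidable (Spec_contains_digits_and_commas s out) := by unfold Spec_contains_digits_and_commas; infer_instance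

-- ===== CLAIM (what is proved, stated in full; the proofs are below) =====
def Claim_equal_contains_digits_and_commas : Prop := ∀ (s : String), Dom_contains_digits_and_commas s → Spec_contains_digits_and_commas s (contains_digits_and_commas s)

-- ===== LEMMAS AND PROOFS =====

-- A's loop computes the conjunction of the two flag-completions (flags never both set on entry)
lemma cdcLoopA_eq (cs : List Char) : ∀ cd cc : Bool, (cd && cc) = false →
    cdcLoopA cs cd cc =
      ((cd || cs.any fun c => PySem.Chars.isdigit c) &&
       (cc || cs.any fun c => !PySem.Chars.isdigit c && (c == ',' || c == '+' || c == '-'))) := by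
  induction cs with
  | nil =>
    intro cd cc h
    cases cd <;> cases cc <;> simp_all [cdcLoopA]
  | cons c rest ih =>
    intro cd cc h
    cases hd : PySem.Chars.isdigit c <;>
      cases hb : (c == ',' || c == '+' || c == '-') <;>
        simp only [cdcLoopA, hd, hb, List.any_cons, Bool.not_true, Bool.not_false] <;>
          cases cd <;> cases cc <;> simp_all [ih]

-- the !isdigit guard is redundant on separator membership
lemma cdc_char (c : Char) :
    (!PySem.Chars.isdigit c && (c == ',' || c == '+' || c == '-')) = [',', '+', '-'].contains c := by
  by_cases h1 : c = ','
  · subst h1; decide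
  · by_cases h2 : c = '+'
    · subst h2; decide
    · by_cases h3 : c = '-'
      · subst h3; decide
      · simp [List.contains_eq_mem, h1, h2, h3]

lemma cdc_any_sep (cs : List Char) :
    (cs.any fun c => !PySem.Chars.isdigit c && (c == ',' || c == '+' || c == '-')) =
    (cs.any fun c => [',', '+', '-'].contains c) := by
  simp only [cdc_char]

-- ===== VERDICT (by name: the statement is the Claim_ definition above) =====
theorem contains_digits_and_commas_spec : Claim_equal_contains_digits_and_commas := by
  intro s _
  unfold Spec_contains_digits_and_commas contains_digits_and_commas contains_digits_and_commas_alt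
  rw [cdcLoopA_eq _ _ _ rfl, cdc_any_sep]
  simp
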